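-- pv_equiv track=rewrite | github.com/jiazhanfeng1989/jzf-skills | skills/create-iso-country-geohash/scripts/generate_country_geohash.py | compact_geohashes
-- ===== SOURCE A (Python) =====
-- BASE32 = "0123456789bcdefghjkmnpqrstuvwxyz"
--
-- def compact_geohashes(hashes: set[str], min_len: int) -> list[str]:
--     """
--     If all 32 children (parent + one base32 char) are present, replace them with the parent.
--     Repeat until stable. Does not shorten below min_len (e.g. 3).
--     This recovers cases where float/boundary checks forced a full subdivide even though the
--     whole parent cell is on land.
--     """
--     s = set(hashes)
--     exp_cache: dict[str, set[str]] = {}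
--
--     def expected_children(parent: str) -> set[str]:
--         if parent not in exp_cache:
--             exp_cache[parent] = {parent + c for c in BASE32}
--         return exp_cache[parent]
--
--     changed = True
--     while changed:
--         changed = False
--         max_len = max((len(h) for h in s), default=0)
--         to_remove: set[str] = set()
--         to_add: set[str] = set()
--         for L in range(max_len, min_len, -1):
--             by_parent: dict[str, set[str]] = {}
--             for h in s:
--                 if len(h) != L:
--                     continue
--                 p = h[:-1]
--                 if len(p) < min_len:
--                     continue
--                 by_parent.setdefault(p, set()).add(h)
--             for parent, children in by_parent.items():
--                 if len(children) == 32 and children == expected_children(parent):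
--                     to_remove.update(children)
--                     to_add.add(parent)
--                     changed = True
--         s -= to_remove
--         s |= to_add
--
--     return sorted(s)
-- ===== SOURCE B (Python) =====
-- BASE32 = "0123456789bcdefghjkmnpqrstuvwxyz"
--
-- def compact_geohashes(hashes: "set[str]", min_len: int) -> "list[str]":
--     # Alternative round structure: a single counting scan per round (parent -> count
--     # plus a blocked set), with complete families reconstructed from the parent.
--     s = set(hashes)
--     while True:
--         count: dict[str, int] = {}
--         blocked: set[str] = set()
--         for h in s:
--             if h and len(h) > min_len:
--                 p = h[:-1]
--                 if h[-1] in BASE32: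
--                     count[p] = count.get(p, 0) + 1
--                 else:
--                     blocked.add(p)
--         merged = [p for p, c in count.items() if c == 32 and p not in blocked]
--         if not merged:
--             return sorted(s)
--         for p in merged:
--             for c in BASE32:
--                 s.discard(p + c)
--         s.update(merged)
-- ===== Notes on version B (the rewrite author's own statement) =====
-- stated objective: alternative
-- what changed: Each round makes a single counting scan of the set (parent -> child-count dict plus a blocked set, with complete families reconstructed from the parent) instead of A's one grouping scan of the whole set per length level after a separate max() scan.
import Mathlib
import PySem

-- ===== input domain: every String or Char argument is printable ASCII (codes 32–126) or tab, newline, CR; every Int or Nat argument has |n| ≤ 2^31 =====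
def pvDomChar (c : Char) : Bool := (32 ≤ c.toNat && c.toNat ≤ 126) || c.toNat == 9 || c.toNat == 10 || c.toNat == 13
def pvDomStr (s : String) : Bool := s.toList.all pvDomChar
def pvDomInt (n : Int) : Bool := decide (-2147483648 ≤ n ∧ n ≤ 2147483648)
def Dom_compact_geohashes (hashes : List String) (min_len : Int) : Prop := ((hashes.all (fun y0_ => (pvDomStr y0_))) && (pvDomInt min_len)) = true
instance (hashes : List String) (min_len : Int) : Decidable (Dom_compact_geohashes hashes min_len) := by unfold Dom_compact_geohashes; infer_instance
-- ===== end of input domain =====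

-- B replaces A's per-round work (a max() scan plus one grouping scan of the whole set per length
-- level) by a single counting scan per round; objective: alternative algorithm, same result.

def pyBASE32 : String := "0123456789bcdefghjkmnpqrstuvwxyz"

-- h[:-1]
def parentOf (h : String) : String := PySem.Str.slice h none (some (-1))

-- parent + c  (Python string concatenation)
def childOf (p : String) (c : Char) : String := String.ofList (p.toList ++ [c])

-- ===== PORT A =====
-- Python's exp_cache is a pure memo of this set comprehension; ported as the function itself.
def expectedChildren (parent : String) : PySem.Set String :=
  PySem.Set.ofList (pyBASE32.toList.map (childOf parent))

-- the `for h in s: …` dict-building loop at level L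
def byParentAt (min_len L : Int) (s : PySem.Set String) : PySem.Dict String (PySem.Set String) :=
  s.foldl (fun d h =>
    if PySem.Str.len h ≠ L then d
    else if PySem.Str.len (parentOf h) < min_len then d
    else d.modify (parentOf h) PySem.Set.empty (fun cs => PySem.Set.add cs h)) PySem.Dict.empty

-- the body of `for parent, children in by_parent.items(): …` acting on (to_remove, to_add, changed)
def aStep (acc : PySem.Set String × PySem.Set String × Bool) (pc : String × PySem.Set String) :
    PySem.Set String × PySem.Set String × Bool :=
  if PySem.Set.len pc.2 == 32 && PySem.Set.equal pc.2 (expectedChildren pc.1)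
  then (PySem.Set.update acc.1 pc.2, PySem.Set.add acc.2.1 pc.1, true)
  else acc

-- one iteration of A's while-loop body: returns (to_remove, to_add, changed)
def aRound (min_len : Int) (s : PySem.Set String) :
    PySem.Set String × PySem.Set String × Bool :=
  let max_len := PySem.List.maxD (s.map PySem.Str.len) (fun x => x) 0
  (PySem.List.pyRange max_len min_len (-1)).foldl
    (fun acc L => (byParentAt min_len L s).items.foldl aStep acc)
    (PySem.Set.empty, PySem.Set.empty, false)

-- A's while-loop. Each changed round removes ≥ 32 and adds ≤ 1 string per merged family, so the
-- set shrinks strictly on every changed round and fuel = |s| + 1 always suffices (the Python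
-- loop terminates for the same reason).
def aLoop (min_len : Int) : Nat → PySem.Set String → PySem.Set String
  | 0, s => s
  | fuel + 1, s =>
      let r := aRound min_len s
      let s' := PySem.Set.union (PySem.Set.diff s r.1) r.2.1
      if r.2.2 then aLoop min_len fuel s' else s'

def compact_geohashes (hashes : List String) (min_len : Int) : List String :=
  let s := PySem.Set.ofList hashes
  PySem.List.sorted (aLoop min_len (s.length + 1) s) (fun x => x) false

-- ===== PORT B =====
-- `h[-1] in BASE32` (h nonempty is guarded by the caller)
def lastInBase32 (h : String) : Bool :=
  match PySem.Str.pyGet? h (-1) with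
  | some c => PySem.Str.isIn (String.ofList [c]) pyBASE32
  | none => false

-- the body of B's counting scan, acting on (count, blocked)
def bScan (min_len : Int) (st : PySem.Dict String Int × PySem.Set String) (h : String) :
    PySem.Dict String Int × PySem.Set String :=
  if h ≠ "" ∧ min_len < PySem.Str.len h then
    if lastInBase32 h then (st.1.modify (parentOf h) 0 (· + 1), st.2)
    else (st.1, PySem.Set.add st.2 (parentOf h))
  else st

-- one round's scan + comprehension: the list of parents whose family is complete
def mergedOf (min_len : Int) (s : PySem.Set String) : List String :=
  let cb := s.foldl (bScan min_len) ((PySem.Dict.empty : PySem.Dict String Int), (PySem.Set.empty : PySem.Set String))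
  (cb.1.items.filter (fun pc => pc.2 == 32 && !(PySem.Set.contains cb.2 pc.1))).map (·.1)

-- `for c in BASE32: s.discard(p + c)`
def discardFamily (s : PySem.Set String) (p : String) : PySem.Set String :=
  pyBASE32.toList.foldl (fun s c => PySem.Set.discard s (childOf p c)) s

-- B's while-loop (same termination argument as A's: every non-returning round shrinks the set,
-- so fuel = |s| + 1 suffices).
def bLoop (min_len : Int) : Nat → PySem.Set String → List String
  | 0, s => PySem.List.sorted s (fun x => x) false
  | fuel + 1, s =>
      let merged := mergedOf min_len s
      if merged.isEmpty then PySem.List.sorted s (fun x => x) false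
      else bLoop min_len fuel (PySem.Set.update (merged.foldl discardFamily s) merged)

def compact_geohashes_alt (hashes : List String) (min_len : Int) : List String :=
  let s := PySem.Set.ofList hashes
  bLoop min_len (s.length + 1) s

-- ===== PRECONDITION & SPEC =====
def Spec_compact_geohashes (hashes : List String) (min_len : Int) (out : List String) : Prop := out = compact_geohashes_alt hashes min_len
instance (hashes : List String) (min_len : Int) (out : List String) : Decidable (Spec_compact_geohashes hashes min_len out) := by unfold Spec_compact_geohashes; infer_instance

-- ===== CLAIM (what is proved, stated in full; the proofs are below) =====
def Claim_equal_compact_geohashes : Prop := ∀ (hashes : List String) (min_len : Int), Dom_compact_geohashes hashes min_len → Spec_compact_geohashes hashes min_len (compact_geohashes hashes min_len)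

-- ===== LEMMAS AND PROOFS =====

-- a parent p is "mergeable" in s iff A's (and B's) round replaces its 32 children by p:
-- p is long enough, all 32 base32 children are in s, and no other child of p is in s
def Mergeable (min_len : Int) (s : List String) (p : String) : Prop :=
  min_len ≤ PySem.Str.len p ∧ (∀ c ∈ pyBASE32.toList, childOf p c ∈ s) ∧
  (∀ h ∈ s, h ≠ "" → parentOf h = p → ∃ c ∈ pyBASE32.toList, h = childOf p c)

-- ---- basic string facts ----
theorem toList_childOf (p : String) (c : Char) : (childOf p c).toList = p.toList ++ [c] := by
  simp [childOf]

theorem toList_parentOf (h : String) : (parentOf h).toList = h.toList.dropLast :=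
  PySem.Str.slice_to_neg_one h

theorem parentOf_childOf (p : String) (c : Char) : parentOf (childOf p c) = p := by
  apply String.toList_inj.mp
  rw [toList_parentOf, toList_childOf]
  simp

theorem childOf_ne_empty (p : String) (c : Char) : childOf p c ≠ "" := by
  intro h
  have := congrArg String.toList h
  rw [toList_childOf] at this
  simp at this

theorem childOf_inj {p q : String} {c d : Char} (h : childOf p c = childOf q d) :
    p = q ∧ c = d := by
  have := congrArg String.toList h
  rw [toList_childOf, toList_childOf] at this
  have := List.append_inj' this rfl
  refine ⟨String.toList_inj.mp this.1, ?_⟩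
  simpa using this.2

theorem eq_childOf_parentOf {h : String} (hne : h ≠ "") : ∃ c, h = childOf (parentOf h) c := by
  have hnil : h.toList ≠ [] := by
    intro hc; apply hne; apply String.toList_inj.mp; simpa using hc
  refine ⟨h.toList.getLast hnil, ?_⟩
  apply String.toList_inj.mp
  simp [childOf, toList_parentOf, List.dropLast_concat_getLast hnil]

theorem len_childOf (p : String) (c : Char) :
    PySem.Str.len (childOf p c) = PySem.Str.len p + 1 := by
  simp [toList_childOf]

theorem lastInBase32_childOf (p : String) (c : Char) :
    lastInBase32 (childOf p c) = true ↔ c ∈ pyBASE32.toList := by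
  have hget : PySem.Str.pyGet? (childOf p c) (-1) = some c := by
    simp [childOf, PySem.List.pyGet?, PySem.List.pyIdx?]
  rw [lastInBase32, hget, PySem.Str.isIn_iff_infix]
  simp [List.singleton_infix_iff]

theorem mem_expectedChildren (p : String) (y : String) :
    y ∈ expectedChildren p ↔ ∃ c ∈ pyBASE32.toList, y = childOf p c := by
  simp [expectedChildren, PySem.Set.mem_ofList, eq_comm]

theorem nodup_B32 : pyBASE32.toList.Nodup := by decide

theorem length_B32 : pyBASE32.toList.length = 32 := by decide

theorem expectedChildren_eq (p : String) :
    expectedChildren p = pyBASE32.toList.map (childOf p) := by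
  apply PySem.Set.ofList_eq_self_of_nodup
  exact (List.Nodup.map (fun a b hab => (childOf_inj hab).2) nodup_B32)

theorem mergeable_congr {ml : Int} {s t : List String} (hm : ∀ x, x ∈ s ↔ x ∈ t) (p : String) :
    Mergeable ml s p ↔ Mergeable ml t p := by
  simp only [Mergeable, hm]

-- ---- A side ----
theorem byParentAt_eq (ml L : Int) (s : PySem.Set String) :
    byParentAt ml L s =
      (s.filter (fun h => decide (PySem.Str.len h = L ∧ ml ≤ PySem.Str.len (parentOf h)))).foldl
        (fun d h => d.modify (parentOf h) PySem.Set.empty (fun cs => PySem.Set.add cs h))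
        PySem.Dict.empty := by
  unfold byParentAt
  rw [show (fun (d : PySem.Dict String (PySem.Set String)) h =>
        if PySem.Str.len h ≠ L then d
        else if PySem.Str.len (parentOf h) < ml then d
        else d.modify (parentOf h) PySem.Set.empty (fun cs => PySem.Set.add cs h))
      = (fun d h => if PySem.Str.len h = L ∧ ml ≤ PySem.Str.len (parentOf h)
          then d.modify (parentOf h) PySem.Set.empty (fun cs => PySem.Set.add cs h) else d) from ?_]
  · exact PySem.List.foldl_ite_eq_foldl_filter _ _ _ _
  · funext d h
    split_ifs <;> first | rfl | omega

theorem getD_foldl_modify_addChild (l : List String) :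
    ∀ (d : PySem.Dict String (PySem.Set String)) (p : String),
      ((l.foldl (fun d h => d.modify (parentOf h) PySem.Set.empty (fun cs => PySem.Set.add cs h)) d).getD p PySem.Set.empty)
        = PySem.Set.update (d.getD p PySem.Set.empty) (l.filter (fun h => parentOf h == p)) := by
  induction l with
  | nil => intro d p; simp [PySem.Set.update]
  | cons a t ih =>
    intro d p
    simp only [List.foldl_cons, List.filter_cons]
    by_cases hp : parentOf a = p
    · rw [ih]
      simp [hp, PySem.Set.update, PySem.Dict.getD_modify_self]
    · rw [ih, PySem.Dict.getD_modify_of_ne _ _ _ (Ne.symm hp)]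
      simp [hp]

theorem getD_byParentAt (ml L : Int) (s : PySem.Set String) (p : String) :
    (byParentAt ml L s).getD p PySem.Set.empty
      = PySem.Set.ofList (s.filter (fun h =>
          decide (PySem.Str.len h = L ∧ ml ≤ PySem.Str.len (parentOf h)) && (parentOf h == p))) := by
  rw [byParentAt_eq, getD_foldl_modify_addChild, PySem.Dict.getD_empty, List.filter_filter]
  rw [show (fun a => parentOf a == p && decide (PySem.Str.len a = L ∧ ml ≤ PySem.Str.len (parentOf a)))
      = (fun h => decide (PySem.Str.len h = L ∧ ml ≤ PySem.Str.len (parentOf h)) && (parentOf h == p)) from by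
    funext a; exact Bool.and_comm _ _]
  rfl

theorem keys_byParentAt_nodup (ml L : Int) (s : PySem.Set String) :
    (byParentAt ml L s).keys.Nodup := by
  rw [byParentAt_eq]
  exact PySem.Dict.nodup_keys_foldl_modify_key _ parentOf PySem.Set.empty
    (fun _ h => fun cs => PySem.Set.add cs h) _ (by simp [PySem.Dict.keys_empty])

theorem mem_keys_byParentAt (ml L : Int) (s : PySem.Set String) (p : String) :
    p ∈ (byParentAt ml L s).keys ↔
      ∃ h ∈ s, (PySem.Str.len h = L ∧ ml ≤ PySem.Str.len (parentOf h)) ∧ parentOf h = p := by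
  rw [byParentAt_eq]
  rw [PySem.Dict.keys_foldl_modify_key _ parentOf PySem.Set.empty (fun _ h => fun cs => PySem.Set.add cs h)]
  rw [show (PySem.Dict.empty : PySem.Dict String (PySem.Set String)).keys = [] from rfl]
  rw [show (PySem.Set.update ([] : PySem.Set String) (((s.filter (fun h => decide (PySem.Str.len h = L ∧ ml ≤ PySem.Str.len (parentOf h)))).map parentOf)) : PySem.Set String) = PySem.Set.ofList _ from rfl]
  rw [PySem.Set.mem_ofList]
  simp only [List.mem_map, List.mem_filter, decide_eq_true_eq]
  constructor
  · rintro ⟨h, ⟨hs, hc⟩, hp⟩; exact ⟨h, hs, hc, hp⟩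
  · rintro ⟨h, hs, hc, hp⟩; exact ⟨h, ⟨hs, hc⟩, hp⟩

theorem mem_items_byParentAt (ml L : Int) (s : PySem.Set String) (pc : String × PySem.Set String) :
    pc ∈ (byParentAt ml L s).items ↔
      pc.1 ∈ (byParentAt ml L s).keys ∧ pc.2 = (byParentAt ml L s).getD pc.1 PySem.Set.empty := by
  rw [PySem.Dict.items_eq_map_keys _ (keys_byParentAt_nodup ml L s) PySem.Set.empty]
  simp only [List.mem_map]
  constructor
  · rintro ⟨k, hk, rfl⟩; exact ⟨hk, rfl⟩
  · rintro ⟨hk, hv⟩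
    exact ⟨pc.1, hk, by rw [← hv]⟩

theorem mem_getD_byParentAt (ml L : Int) (s : PySem.Set String) (p y : String) :
    y ∈ (byParentAt ml L s).getD p PySem.Set.empty
      ↔ y ∈ s ∧ (PySem.Str.len y = L ∧ ml ≤ PySem.Str.len (parentOf y)) ∧ parentOf y = p := by
  rw [getD_byParentAt, PySem.Set.mem_ofList]
  simp [List.mem_filter, and_assoc]

theorem ne_empty_of_len_succ {y p : String} (h : PySem.Str.len y = PySem.Str.len p + 1) : y ≠ "" := by
  intro hc; subst hc; simp [PySem.Str.len_eq] at h; omega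

theorem passing_pair {ml L : Int} {s : PySem.Set String}
    {pc : String × PySem.Set String} (hmem : pc ∈ (byParentAt ml L s).items)
    (hq : (PySem.Set.len pc.2 == 32 && PySem.Set.equal pc.2 (expectedChildren pc.1)) = true) :
    Mergeable ml s pc.1 ∧ (∀ y, y ∈ pc.2 ↔ y ∈ expectedChildren pc.1) := by
  obtain ⟨hkey, hcs⟩ := (mem_items_byParentAt ml L s pc).mp hmem
  rw [Bool.and_eq_true] at hq
  have hequal := hq.2
  have hmemiff : ∀ y, y ∈ pc.2 ↔ y ∈ expectedChildren pc.1 :=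
    (PySem.Set.equal_iff _ _).mp hequal
  have hmemcs : ∀ y, y ∈ pc.2 ↔ y ∈ s ∧ (PySem.Str.len y = L ∧ ml ≤ PySem.Str.len (parentOf y)) ∧ parentOf y = pc.1 := by
    intro y; rw [hcs]; exact mem_getD_byParentAt ml L s pc.1 y
  have hzero : childOf pc.1 '0' ∈ pc.2 := by
    rw [hmemiff, mem_expectedChildren]
    exact ⟨'0', by decide, rfl⟩
  have hz := (hmemcs _).mp hzero
  have hL : L = PySem.Str.len pc.1 + 1 := by
    have := hz.2.1.1
    rw [len_childOf] at this; omega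
  have hmlp : ml ≤ PySem.Str.len pc.1 := by
    have := hz.2.1.2
    rwa [parentOf_childOf] at this
  refine ⟨⟨hmlp, ?_, ?_⟩, hmemiff⟩
  · intro c hc
    have : childOf pc.1 c ∈ pc.2 := by
      rw [hmemiff, mem_expectedChildren]; exact ⟨c, hc, rfl⟩
    exact ((hmemcs _).mp this).1
  · intro h hs hne hp
    obtain ⟨c', hc'⟩ := eq_childOf_parentOf hne
    rw [hp] at hc'
    have hhcs : h ∈ pc.2 := by
      rw [hmemcs]
      refine ⟨hs, ⟨?_, ?_⟩, hp⟩
      · rw [hc', len_childOf]; omega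
      · rw [hp]; exact hmlp
    rw [hmemiff, mem_expectedChildren] at hhcs
    exact hhcs

theorem mergeable_pair {ml : Int} {s : PySem.Set String} {p : String}
    (hm : Mergeable ml s p) :
    (PySem.Str.len p + 1) ∈ PySem.List.pyRange (PySem.List.maxD (s.map PySem.Str.len) (fun x => x) 0) ml (-1)
    ∧ (p, (byParentAt ml (PySem.Str.len p + 1) s).getD p PySem.Set.empty) ∈ (byParentAt ml (PySem.Str.len p + 1) s).items
    ∧ (PySem.Set.len ((byParentAt ml (PySem.Str.len p + 1) s).getD p PySem.Set.empty) == 32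
        && PySem.Set.equal ((byParentAt ml (PySem.Str.len p + 1) s).getD p PySem.Set.empty) (expectedChildren p)) = true := by
  obtain ⟨h1, h2, h3⟩ := hm
  set L := PySem.Str.len p + 1 with hLdef
  have hz : childOf p '0' ∈ s := h2 '0' (by decide)
  have hmemiff : ∀ y, y ∈ (byParentAt ml L s).getD p PySem.Set.empty ↔ y ∈ expectedChildren p := by
    intro y
    rw [mem_getD_byParentAt, mem_expectedChildren]
    constructor
    · rintro ⟨hs, ⟨hlen, _⟩, hp⟩
      have hne : y ≠ "" := ne_empty_of_len_succ (p := p) (by omega)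
      exact h3 y hs hne hp
    · rintro ⟨c, hc, rfl⟩
      exact ⟨h2 c hc, ⟨by rw [len_childOf], by rw [parentOf_childOf]; exact h1⟩, parentOf_childOf p c⟩
  have hexp_eq := expectedChildren_eq p
  have hexp_len : (expectedChildren p).length = 32 := by
    rw [hexp_eq, List.length_map]; exact length_B32
  have hexp_nodup : (expectedChildren p).Nodup := by
    rw [hexp_eq]; exact List.Nodup.map (fun a b hab => (childOf_inj hab).2) nodup_B32
  have hcs_nodup : ((byParentAt ml L s).getD p PySem.Set.empty).Nodup := by
    rw [getD_byParentAt]; exact PySem.Set.nodup_ofList _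
  have hperm : ((byParentAt ml L s).getD p PySem.Set.empty).Perm (expectedChildren p) :=
    (List.perm_ext_iff_of_nodup hcs_nodup hexp_nodup).mpr hmemiff
  refine ⟨?_, ?_, ?_⟩
  · rw [PySem.List.mem_pyRange_neg_one]
    constructor
    · omega
    · have : PySem.Str.len (childOf p '0') ≤ PySem.List.maxD (s.map PySem.Str.len) (fun x => x) 0 :=
        PySem.List.le_maxD_id _ _ _ (List.mem_map_of_mem hz)
      rw [len_childOf] at this; omega
  · rw [mem_items_byParentAt]
    refine ⟨?_, rfl⟩
    rw [mem_keys_byParentAt]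
    exact ⟨childOf p '0', hz, ⟨by rw [len_childOf], by rw [parentOf_childOf]; exact h1⟩, parentOf_childOf p '0'⟩
  · rw [Bool.and_eq_true]
    constructor
    · rw [beq_iff_eq, PySem.Set.len_eq, hperm.length_eq, hexp_len]; rfl
    · exact (PySem.Set.equal_iff _ _).mpr hmemiff

theorem foldTriple_spec {ι : Type} (q : ι → Bool) (g : ι → PySem.Set String) (k : ι → String)
    (l : List ι) :
    ∀ acc : PySem.Set String × PySem.Set String × Bool,
      (∀ y, y ∈ (l.foldl (fun acc x => if q x then (PySem.Set.update acc.1 (g x), PySem.Set.add acc.2.1 (k x), true) else acc) acc).1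
          ↔ y ∈ acc.1 ∨ ∃ x ∈ l, q x = true ∧ y ∈ g x)
      ∧ (∀ y, y ∈ (l.foldl (fun acc x => if q x then (PySem.Set.update acc.1 (g x), PySem.Set.add acc.2.1 (k x), true) else acc) acc).2.1
          ↔ y ∈ acc.2.1 ∨ ∃ x ∈ l, q x = true ∧ y = k x)
      ∧ ((l.foldl (fun acc x => if q x then (PySem.Set.update acc.1 (g x), PySem.Set.add acc.2.1 (k x), true) else acc) acc).2.2
          = (acc.2.2 || l.any q))
      ∧ (acc.1.Nodup → (l.foldl (fun acc x => if q x then (PySem.Set.update acc.1 (g x), PySem.Set.add acc.2.1 (k x), true) else acc) acc).1.Nodup)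
      ∧ (acc.2.1.Nodup → (l.foldl (fun acc x => if q x then (PySem.Set.update acc.1 (g x), PySem.Set.add acc.2.1 (k x), true) else acc) acc).2.1.Nodup) := by
  induction l with
  | nil => intro acc; simp
  | cons a t ih =>
    intro acc
    simp only [List.foldl_cons, List.any_cons]
    by_cases hq : q a = true
    · obtain ⟨i1, i2, i3, i4, i5⟩ := ih (PySem.Set.update acc.1 (g a), PySem.Set.add acc.2.1 (k a), true)
      rw [if_pos hq]
      refine ⟨?_, ?_, ?_, ?_, ?_⟩
      · intro y
        rw [i1]
        simp only [PySem.Set.mem_update]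
        constructor
        · rintro (⟨h | h⟩ | ⟨x, hx, hqx, hy⟩)
          · exact Or.inl h
          · exact Or.inr ⟨a, List.mem_cons_self, hq, h⟩
          · exact Or.inr ⟨x, List.mem_cons_of_mem _ hx, hqx, hy⟩
        · rintro (h | ⟨x, hx, hqx, hy⟩)
          · exact Or.inl (Or.inl h)
          · rcases List.mem_cons.mp hx with rfl | hx
            · exact Or.inl (Or.inr hy)
            · exact Or.inr ⟨x, hx, hqx, hy⟩
      · intro y
        rw [i2]
        simp only [PySem.Set.mem_add]
        constructor
        · rintro (⟨h | h⟩ | ⟨x, hx, hqx, hy⟩)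
          · exact Or.inl h
          · exact Or.inr ⟨a, List.mem_cons_self, hq, h⟩
          · exact Or.inr ⟨x, List.mem_cons_of_mem _ hx, hqx, hy⟩
        · rintro (h | ⟨x, hx, hqx, hy⟩)
          · exact Or.inl (Or.inl h)
          · rcases List.mem_cons.mp hx with rfl | hx
            · exact Or.inl (Or.inr hy)
            · exact Or.inr ⟨x, hx, hqx, hy⟩
      · rw [i3]; simp [hq]
      · intro h; exact i4 (PySem.Set.nodup_update _ _ h)
      · intro h; exact i5 (PySem.Set.nodup_add _ _ h)
    · obtain ⟨i1, i2, i3, i4, i5⟩ := ih acc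
      rw [if_neg hq]
      refine ⟨?_, ?_, ?_, i4, i5⟩
      · intro y
        rw [i1]
        constructor
        · rintro (h | ⟨x, hx, hqx, hy⟩)
          · exact Or.inl h
          · exact Or.inr ⟨x, List.mem_cons_of_mem _ hx, hqx, hy⟩
        · rintro (h | ⟨x, hx, hqx, hy⟩)
          · exact Or.inl h
          · rcases List.mem_cons.mp hx with rfl | hx
            · exact absurd hqx hq
            · exact Or.inr ⟨x, hx, hqx, hy⟩
      · intro y
        rw [i2]
        constructor
        · rintro (h | ⟨x, hx, hqx, hy⟩)
          · exact Or.inl h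
          · exact Or.inr ⟨x, List.mem_cons_of_mem _ hx, hqx, hy⟩
        · rintro (h | ⟨x, hx, hqx, hy⟩)
          · exact Or.inl h
          · rcases List.mem_cons.mp hx with rfl | hx
            · exact absurd hqx hq
            · exact Or.inr ⟨x, hx, hqx, hy⟩
      · rw [i3]; simp [hq]

theorem aRound_eq (ml : Int) (s : PySem.Set String) :
    aRound ml s =
      ((PySem.List.pyRange (PySem.List.maxD (s.map PySem.Str.len) (fun x => x) 0) ml (-1)).flatMap
          (fun L => (byParentAt ml L s).items)).foldl
        (fun acc pc => if PySem.Set.len pc.2 == 32 && PySem.Set.equal pc.2 (expectedChildren pc.1)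
          then (PySem.Set.update acc.1 pc.2, PySem.Set.add acc.2.1 pc.1, true) else acc)
        (PySem.Set.empty, PySem.Set.empty, false) := by
  rw [List.foldl_flatMap]
  rfl

theorem aRound_spec {ml : Int} {s : PySem.Set String} :
    (∀ y, y ∈ (aRound ml s).1 ↔ ∃ p, Mergeable ml s p ∧ ∃ c ∈ pyBASE32.toList, y = childOf p c)
    ∧ (∀ y, y ∈ (aRound ml s).2.1 ↔ Mergeable ml s y)
    ∧ ((aRound ml s).2.2 = true ↔ ∃ p, Mergeable ml s p)
    ∧ (aRound ml s).1.Nodup ∧ (aRound ml s).2.1.Nodup := by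
  rw [aRound_eq]
  obtain ⟨i1, i2, i3, i4, i5⟩ := foldTriple_spec
    (fun pc : String × PySem.Set String => PySem.Set.len pc.2 == 32 && PySem.Set.equal pc.2 (expectedChildren pc.1))
    (fun pc => pc.2) (fun pc => pc.1)
    ((PySem.List.pyRange (PySem.List.maxD (s.map PySem.Str.len) (fun x => x) 0) ml (-1)).flatMap
      (fun L => (byParentAt ml L s).items))
    (PySem.Set.empty, PySem.Set.empty, false)
  refine ⟨?_, ?_, ?_, i4 (by simp [PySem.Set.empty]), i5 (by simp [PySem.Set.empty])⟩
  · intro y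
    rw [i1]
    simp only [List.mem_flatMap, PySem.Set.empty, List.not_mem_nil, false_or]
    constructor
    · rintro ⟨pc, ⟨L, hL, hpc⟩, hq, hy⟩
      obtain ⟨hM, hiff⟩ := passing_pair hpc hq
      obtain ⟨c, hc, rfl⟩ := (mem_expectedChildren _ _).mp ((hiff y).mp hy)
      exact ⟨pc.1, hM, c, hc, rfl⟩
    · rintro ⟨p, hM, c, hc, rfl⟩
      obtain ⟨hL, hmem, hq⟩ := mergeable_pair hM
      refine ⟨(p, (byParentAt ml (PySem.Str.len p + 1) s).getD p PySem.Set.empty),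
        ⟨PySem.Str.len p + 1, hL, hmem⟩, hq, ?_⟩
      rw [Bool.and_eq_true] at hq
      rw [(PySem.Set.equal_iff _ _).mp hq.2, mem_expectedChildren]
      exact ⟨c, hc, rfl⟩
  · intro y
    rw [i2]
    simp only [List.mem_flatMap, PySem.Set.empty, List.not_mem_nil, false_or]
    constructor
    · rintro ⟨pc, ⟨L, hL, hpc⟩, hq, rfl⟩
      exact (passing_pair hpc hq).1
    · intro hM
      obtain ⟨hL, hmem, hq⟩ := mergeable_pair hM
      exact ⟨(y, (byParentAt ml (PySem.Str.len y + 1) s).getD y PySem.Set.empty),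
        ⟨PySem.Str.len y + 1, hL, hmem⟩, hq, rfl⟩
  · rw [i3]
    simp only [Bool.false_or, List.any_eq_true, List.mem_flatMap]
    constructor
    · rintro ⟨pc, ⟨L, hL, hpc⟩, hq⟩
      exact ⟨pc.1, (passing_pair hpc hq).1⟩
    · rintro ⟨p, hM⟩
      obtain ⟨hL, hmem, hq⟩ := mergeable_pair hM
      exact ⟨(p, (byParentAt ml (PySem.Str.len p + 1) s).getD p PySem.Set.empty),
        ⟨PySem.Str.len p + 1, hL, hmem⟩, hq⟩

theorem bScan_fold_spec (ml : Int) (l : List String) :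
    ∀ (st : PySem.Dict String Int × PySem.Set String),
      (∀ p, (l.foldl (bScan ml) st).1.getD p 0
          = st.1.getD p 0 + ((l.filter (fun h => (decide (h ≠ "") && decide (ml < PySem.Str.len h) && lastInBase32 h) && (parentOf h == p))).length : Int))
      ∧ (∀ x, x ∈ (l.foldl (bScan ml) st).2
          ↔ x ∈ st.2 ∨ ∃ h ∈ l, (h ≠ "" ∧ ml < PySem.Str.len h ∧ lastInBase32 h = false) ∧ parentOf h = x)
      ∧ (∀ p, p ∈ (l.foldl (bScan ml) st).1.keys
          ↔ p ∈ st.1.keys ∨ ∃ h ∈ l, (h ≠ "" ∧ ml < PySem.Str.len h ∧ lastInBase32 h = true) ∧ parentOf h = p)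
      ∧ (st.1.keys.Nodup → (l.foldl (bScan ml) st).1.keys.Nodup) := by
  induction l with
  | nil => intro st; simp
  | cons a t ih =>
    intro st
    simp only [List.foldl_cons, List.filter_cons]
    by_cases hc : a ≠ "" ∧ ml < PySem.Str.len a
    · by_cases hb : lastInBase32 a = true
      · have hstep : bScan ml st a = (st.1.modify (parentOf a) 0 (· + 1), st.2) := by
          rw [bScan, if_pos hc, if_pos hb]
        rw [hstep]
        obtain ⟨i1, i2, i3, i4⟩ := ih (st.1.modify (parentOf a) 0 (· + 1), st.2)
        refine ⟨?_, ?_, ?_, ?_⟩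
        · intro p
          rw [i1]
          by_cases hp : parentOf a = p
          · rw [if_pos (by
              simp only [Bool.and_eq_true, decide_eq_true_eq, beq_iff_eq]
              exact ⟨⟨⟨hc.1, hc.2⟩, hb⟩, hp⟩)]
            simp only [List.length_cons]
            rw [show ((st.1.modify (parentOf a) 0 (· + 1)).getD p 0) = st.1.getD p 0 + 1 from by
              rw [← hp, PySem.Dict.getD_modify_self]]
            push_cast; ring
          · rw [if_neg (by simp [hp])]
            rw [PySem.Dict.getD_modify_of_ne _ _ _ (Ne.symm hp)]
        · intro x
          rw [i2]
          constructor
          · rintro (h | ⟨h, hh, hcond, hx⟩)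
            · exact Or.inl h
            · exact Or.inr ⟨h, List.mem_cons_of_mem _ hh, hcond, hx⟩
          · rintro (h | ⟨h, hh, hcond, hx⟩)
            · exact Or.inl h
            · rcases List.mem_cons.mp hh with rfl | hh
              · rw [hcond.2.2] at hb; exact absurd hb (by simp)
              · exact Or.inr ⟨h, hh, hcond, hx⟩
        · intro p
          rw [i3]
          have hmk : p ∈ (st.1.modify (parentOf a) 0 (· + 1)).keys ↔ p = parentOf a ∨ p ∈ st.1.keys := by
            rw [← PySem.Dict.contains_iff_mem_keys, PySem.Dict.contains_modify]
            simp [PySem.Dict.contains_iff_mem_keys]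
          rw [hmk]
          constructor
          · rintro ((rfl | h) | ⟨h, hh, hcond, hx⟩)
            · exact Or.inr ⟨a, List.mem_cons_self, ⟨hc.1, hc.2, hb⟩, rfl⟩
            · exact Or.inl h
            · exact Or.inr ⟨h, List.mem_cons_of_mem _ hh, hcond, hx⟩
          · rintro (h | ⟨h, hh, hcond, hx⟩)
            · exact Or.inl (Or.inr h)
            · rcases List.mem_cons.mp hh with rfl | hh
              · exact Or.inl (Or.inl hx.symm)
              · exact Or.inr ⟨h, hh, hcond, hx⟩
        · intro hnd
          apply i4
          rw [PySem.Dict.keys_modify]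
          exact PySem.Dict.nodup_keys_insert _ _ _ hnd
      · have hstep : bScan ml st a = (st.1, PySem.Set.add st.2 (parentOf a)) := by
          rw [bScan, if_pos hc, if_neg hb]
        rw [hstep]
        obtain ⟨i1, i2, i3, i4⟩ := ih (st.1, PySem.Set.add st.2 (parentOf a))
        rw [Bool.not_eq_true] at hb
        refine ⟨?_, ?_, ?_, i4⟩
        · intro p
          rw [i1, if_neg (by simp [hb])]
        · intro x
          rw [i2]
          simp only [PySem.Set.mem_add]
          constructor
          · rintro ((h | h) | ⟨h, hh, hcond, hx⟩)
            · exact Or.inl h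
            · exact Or.inr ⟨a, List.mem_cons_self, ⟨hc.1, hc.2, hb⟩, h.symm⟩
            · exact Or.inr ⟨h, List.mem_cons_of_mem _ hh, hcond, hx⟩
          · rintro (h | ⟨h, hh, hcond, hx⟩)
            · exact Or.inl (Or.inl h)
            · rcases List.mem_cons.mp hh with rfl | hh
              · exact Or.inl (Or.inr hx.symm)
              · exact Or.inr ⟨h, hh, hcond, hx⟩
        · intro p
          rw [i3]
          constructor
          · rintro (h | ⟨h, hh, hcond, hx⟩)
            · exact Or.inl h
            · exact Or.inr ⟨h, List.mem_cons_of_mem _ hh, hcond, hx⟩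
          · rintro (h | ⟨h, hh, hcond, hx⟩)
            · exact Or.inl h
            · rcases List.mem_cons.mp hh with rfl | hh
              · rw [hcond.2.2] at hb; simp at hb
              · exact Or.inr ⟨h, hh, hcond, hx⟩
    · have hstep : bScan ml st a = st := by rw [bScan, if_neg hc]
      rw [hstep]
      obtain ⟨i1, i2, i3, i4⟩ := ih st
      refine ⟨?_, ?_, ?_, i4⟩
      · intro p
        rw [i1, if_neg (by
          simp only [Bool.and_eq_true, decide_eq_true_eq]
          rintro ⟨⟨⟨h1, h2⟩, -⟩, -⟩
          exact hc ⟨h1, h2⟩)]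
      · intro x
        rw [i2]
        constructor
        · rintro (h | ⟨h, hh, hcond, hx⟩)
          · exact Or.inl h
          · exact Or.inr ⟨h, List.mem_cons_of_mem _ hh, hcond, hx⟩
        · rintro (h | ⟨h, hh, hcond, hx⟩)
          · exact Or.inl h
          · rcases List.mem_cons.mp hh with rfl | hh
            · exact absurd ⟨hcond.1, hcond.2.1⟩ hc
            · exact Or.inr ⟨h, hh, hcond, hx⟩
      · intro p
        rw [i3]
        constructor
        · rintro (h | ⟨h, hh, hcond, hx⟩)
          · exact Or.inl h
          · exact Or.inr ⟨h, List.mem_cons_of_mem _ hh, hcond, hx⟩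
        · rintro (h | ⟨h, hh, hcond, hx⟩)
          · exact Or.inl h
          · rcases List.mem_cons.mp hh with rfl | hh
            · exact absurd ⟨hcond.1, hcond.2.1⟩ hc
            · exact Or.inr ⟨h, hh, hcond, hx⟩

theorem count_filter_eq_32 {ml : Int} {s : PySem.Set String} (hnd : s.Nodup) (p : String) :
    (s.filter (fun h => (decide (h ≠ "") && decide (ml < PySem.Str.len h) && lastInBase32 h) && (parentOf h == p))).length = 32
    ↔ (ml ≤ PySem.Str.len p ∧ ∀ c ∈ pyBASE32.toList, childOf p c ∈ s) := by
  set F := s.filter (fun h => (decide (h ≠ "") && decide (ml < PySem.Str.len h) && lastInBase32 h) && (parentOf h == p)) with hF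
  set E := pyBASE32.toList.map (childOf p) with hE
  have hEnd : E.Nodup := List.Nodup.map (fun a b hab => (childOf_inj hab).2) nodup_B32
  have hElen : E.length = 32 := by rw [hE, List.length_map]; exact length_B32
  have hFnd : F.Nodup := hnd.filter _
  have hFmem : ∀ h, h ∈ F ↔ h ∈ s ∧ (h ≠ "" ∧ ml < PySem.Str.len h ∧ lastInBase32 h = true) ∧ parentOf h = p := by
    intro h
    rw [hF, List.mem_filter]
    simp only [Bool.and_eq_true, decide_eq_true_eq, beq_iff_eq]
    tauto
  have hFsub : F ⊆ E := by
    intro h hh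
    obtain ⟨hs, ⟨hne, _, hlast⟩, hp⟩ := (hFmem h).mp hh
    obtain ⟨c, heq⟩ := eq_childOf_parentOf hne
    rw [hp] at heq
    subst heq
    rw [hE]
    exact List.mem_map_of_mem ((lastInBase32_childOf p c).mp hlast)
  constructor
  · intro hlen
    have hperm : F.Perm E :=
      List.Subperm.perm_of_length_le (List.Nodup.subperm hFnd hFsub) (by omega)
    have hmem0 : ∃ h, h ∈ F := List.exists_mem_of_ne_nil F (by
      intro hc; rw [hc] at hlen; simp at hlen)
    obtain ⟨h0, hh0⟩ := hmem0
    obtain ⟨hs0, ⟨hne0, hlt0, _⟩, hp0⟩ := (hFmem h0).mp hh0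
    obtain ⟨c0, heq0⟩ := eq_childOf_parentOf hne0
    rw [hp0] at heq0
    subst heq0
    rw [len_childOf] at hlt0
    refine ⟨by omega, ?_⟩
    intro c hc
    have : childOf p c ∈ F := hperm.mem_iff.mpr (by rw [hE]; exact List.mem_map_of_mem hc)
    exact ((hFmem _).mp this).1
  · rintro ⟨hml, hall⟩
    have hEsub : E ⊆ F := by
      intro y hy
      rw [hE] at hy
      obtain ⟨c, hc, rfl⟩ := List.mem_map.mp hy
      rw [hFmem]
      exact ⟨hall c hc, ⟨childOf_ne_empty p c, by rw [len_childOf]; omega,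
        (lastInBase32_childOf p c).mpr hc⟩, parentOf_childOf p c⟩
    have hperm : F.Perm E := (List.perm_ext_iff_of_nodup hFnd hEnd).mpr
      (fun y => ⟨fun hy => hFsub hy, fun hy => hEsub hy⟩)
    rw [hperm.length_eq, hElen]

theorem mem_mergedOf {ml : Int} {s : PySem.Set String} (hnd : s.Nodup) (p : String) :
    p ∈ mergedOf ml s ↔ Mergeable ml s p := by
  obtain ⟨i1, i2, i3, i4⟩ := bScan_fold_spec ml s
    ((PySem.Dict.empty : PySem.Dict String Int), (PySem.Set.empty : PySem.Set String))
  have hknd : (s.foldl (bScan ml) (PySem.Dict.empty, PySem.Set.empty)).1.keys.Nodup :=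
    i4 (by simp [PySem.Dict.keys_empty])
  have hmm : p ∈ mergedOf ml s ↔
      p ∈ (s.foldl (bScan ml) ((PySem.Dict.empty : PySem.Dict String Int), (PySem.Set.empty : PySem.Set String))).1.keys
      ∧ (s.foldl (bScan ml) ((PySem.Dict.empty : PySem.Dict String Int), (PySem.Set.empty : PySem.Set String))).1.getD p 0 = 32
      ∧ ¬ p ∈ (s.foldl (bScan ml) ((PySem.Dict.empty : PySem.Dict String Int), (PySem.Set.empty : PySem.Set String))).2 := by
    rw [mergedOf]
    rw [PySem.Dict.items_eq_map_keys _ hknd 0]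
    simp only [List.mem_map, List.mem_filter, Bool.and_eq_true, beq_iff_eq, Bool.not_eq_true']
    constructor
    · rintro ⟨pc, ⟨⟨k, hk, rfl⟩, hv, hnb⟩, rfl⟩
      refine ⟨hk, hv, ?_⟩
      dsimp only at hnb
      intro hc
      rw [← PySem.Set.contains_iff] at hc
      rw [hnb] at hc
      exact absurd hc (by simp)
    · rintro ⟨hk, hv, hnb⟩
      refine ⟨(p, (s.foldl (bScan ml) (PySem.Dict.empty, PySem.Set.empty)).1.getD p 0),
        ⟨⟨p, hk, rfl⟩, hv, ?_⟩, rfl⟩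
      rw [Bool.eq_false_iff]
      intro hc
      exact hnb ((PySem.Set.contains_iff _ _).mp hc)
  rw [hmm, i1 p, i3 p, i2 p, PySem.Dict.getD_empty]
  simp only [PySem.Dict.keys_empty, List.not_mem_nil, false_or, PySem.Set.empty]
  constructor
  · rintro ⟨⟨h0, hh0, hcond0, hp0⟩, hcount, hnb⟩
    have hlen : (s.filter (fun h => (decide (h ≠ "") && decide (ml < PySem.Str.len h) && lastInBase32 h) && (parentOf h == p))).length = 32 := by omega
    obtain ⟨hml, hall⟩ := (count_filter_eq_32 hnd p).mp hlen
    refine ⟨hml, hall, ?_⟩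
    intro h hs hne hp
    obtain ⟨c, heq⟩ := eq_childOf_parentOf hne
    rw [hp] at heq
    subst heq
    by_cases hlast : lastInBase32 (childOf p c) = true
    · exact ⟨c, (lastInBase32_childOf p c).mp hlast, rfl⟩
    · exfalso
      exact hnb ⟨childOf p c, hs, ⟨childOf_ne_empty p c, by rw [len_childOf]; omega,
        Bool.not_eq_true _ ▸ hlast⟩, parentOf_childOf p c⟩
  · rintro ⟨hml, hall, hcond3⟩
    have hlen := (count_filter_eq_32 hnd p).mpr ⟨hml, hall⟩
    refine ⟨⟨childOf p '0', hall '0' (by decide),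
        ⟨childOf_ne_empty p '0', by rw [len_childOf]; omega, (lastInBase32_childOf p '0').mpr (by decide)⟩,
        parentOf_childOf p '0'⟩, by omega, ?_⟩
    rintro ⟨h, hs, ⟨hne, hlt, hlast⟩, hp⟩
    obtain ⟨c, hc, rfl⟩ := hcond3 h hs hne hp
    rw [(lastInBase32_childOf p c).mpr hc] at hlast
    simp at hlast

theorem mem_foldl_discard_chars (cs : List Char) (p : String) :
    ∀ (s : PySem.Set String) (x : String),
      x ∈ cs.foldl (fun s c => PySem.Set.discard s (childOf p c)) s
      ↔ x ∈ s ∧ ∀ c ∈ cs, x ≠ childOf p c := by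
  induction cs with
  | nil => intro s x; simp
  | cons a t ih =>
    intro s x
    simp only [List.foldl_cons]
    rw [ih]
    rw [PySem.Set.mem_discard]
    constructor
    · rintro ⟨⟨hx, hne⟩, hall⟩
      refine ⟨hx, ?_⟩
      intro c hc
      rcases List.mem_cons.mp hc with rfl | hc
      · exact hne
      · exact hall c hc
    · rintro ⟨hx, hall⟩
      exact ⟨⟨hx, hall a List.mem_cons_self⟩, fun c hc => hall c (List.mem_cons_of_mem _ hc)⟩

theorem nodup_foldl_discard_chars (cs : List Char) (p : String) :
    ∀ (s : PySem.Set String), s.Nodup → (cs.foldl (fun s c => PySem.Set.discard s (childOf p c)) s).Nodup := by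
  induction cs with
  | nil => intro s h; exact h
  | cons a t ih =>
    intro s h
    exact ih _ (PySem.Set.nodup_discard _ _ h)

theorem mem_foldl_discardFamily (merged : List String) :
    ∀ (s : PySem.Set String) (x : String),
      x ∈ merged.foldl discardFamily s
      ↔ x ∈ s ∧ ¬ ∃ p ∈ merged, ∃ c ∈ pyBASE32.toList, x = childOf p c := by
  induction merged with
  | nil => intro s x; simp
  | cons a t ih =>
    intro s x
    simp only [List.foldl_cons]
    rw [ih]
    rw [show discardFamily s a = pyBASE32.toList.foldl (fun s c => PySem.Set.discard s (childOf a c)) s from rfl]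
    rw [mem_foldl_discard_chars]
    constructor
    · rintro ⟨⟨hx, hone⟩, hrest⟩
      refine ⟨hx, ?_⟩
      rintro ⟨p, hp, c, hc, rfl⟩
      rcases List.mem_cons.mp hp with rfl | hp
      · exact hone c hc rfl
      · exact hrest ⟨p, hp, c, hc, rfl⟩
    · rintro ⟨hx, hno⟩
      refine ⟨⟨hx, ?_⟩, ?_⟩
      · intro c hc hne
        exact hno ⟨a, List.mem_cons_self, c, hc, hne⟩
      · rintro ⟨p, hp, c, hc, rfl⟩
        exact hno ⟨p, List.mem_cons_of_mem _ hp, c, hc, rfl⟩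

theorem nodup_foldl_discardFamily (merged : List String) :
    ∀ (s : PySem.Set String), s.Nodup → (merged.foldl discardFamily s).Nodup := by
  induction merged with
  | nil => intro s h; exact h
  | cons a t ih =>
    intro s h
    apply ih
    rw [show discardFamily s a = pyBASE32.toList.foldl (fun s c => PySem.Set.discard s (childOf a c)) s from rfl]
    exact nodup_foldl_discard_chars _ _ _ h

theorem master (ml : Int) : ∀ (fuel : Nat) (sA sB : PySem.Set String),
    sA.Nodup → sB.Nodup → (∀ x, x ∈ sA ↔ x ∈ sB) →
    PySem.List.sorted (aLoop ml fuel sA) (fun x => x) false = bLoop ml fuel sB := by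
  intro fuel
  induction fuel with
  | zero =>
    intro sA sB hA hB hm
    exact PySem.List.sorted_eq_sorted_of_perm _ _ _ (fun a b h => h)
      ((List.perm_ext_iff_of_nodup hA hB).mpr hm)
  | succ fuel ih =>
    intro sA sB hA hB hm
    obtain ⟨a1, a2, a3, a4, a5⟩ := aRound_spec (ml := ml) (s := sA)
    show PySem.List.sorted
        (if (aRound ml sA).2.2
          then aLoop ml fuel (PySem.Set.union (PySem.Set.diff sA (aRound ml sA).1) (aRound ml sA).2.1)
          else PySem.Set.union (PySem.Set.diff sA (aRound ml sA).1) (aRound ml sA).2.1) (fun x => x) false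
      = (if (mergedOf ml sB).isEmpty then PySem.List.sorted sB (fun x => x) false
         else bLoop ml fuel (PySem.Set.update ((mergedOf ml sB).foldl discardFamily sB) (mergedOf ml sB)))
    have hsA' : ∀ x, x ∈ PySem.Set.union (PySem.Set.diff sA (aRound ml sA).1) (aRound ml sA).2.1
        ↔ (x ∈ sA ∧ ¬ ∃ p, Mergeable ml sA p ∧ ∃ c ∈ pyBASE32.toList, x = childOf p c) ∨ Mergeable ml sA x := by
      intro x
      rw [PySem.Set.mem_union, PySem.Set.mem_diff, a1, a2]
    by_cases hM : ∃ p, Mergeable ml sA p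
    · rw [if_pos (a3.mpr hM)]

      have hMB : ∃ p, p ∈ mergedOf ml sB := by
        obtain ⟨p, hp⟩ := hM
        exact ⟨p, (mem_mergedOf hB p).mpr ((mergeable_congr hm p).mp hp)⟩
      rw [if_neg (by
        rw [List.isEmpty_iff]
        intro hc
        obtain ⟨p, hp⟩ := hMB
        rw [hc] at hp
        exact List.not_mem_nil hp)]
      apply ih
      · exact PySem.Set.nodup_union _ _ (PySem.Set.nodup_diff _ _ hA)
      · exact PySem.Set.nodup_update _ _ (nodup_foldl_discardFamily _ _ hB)
      · intro x
        rw [hsA' x, PySem.Set.mem_update, mem_foldl_discardFamily]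
        constructor
        · rintro (⟨hx, hno⟩ | hMx)
          · refine Or.inl ⟨(hm x).mp hx, ?_⟩
            rintro ⟨p, hp, c, hc, rfl⟩
            exact hno ⟨p, (mergeable_congr hm p).mpr ((mem_mergedOf hB p).mp hp), c, hc, rfl⟩
          · exact Or.inr ((mem_mergedOf hB x).mpr ((mergeable_congr hm x).mp hMx))
        · rintro (⟨hx, hno⟩ | hmx)
          · refine Or.inl ⟨(hm x).mpr hx, ?_⟩
            rintro ⟨p, hp, c, hc, rfl⟩
            exact hno ⟨p, (mem_mergedOf hB p).mpr ((mergeable_congr hm p).mp hp), c, hc, rfl⟩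
          · exact Or.inr ((mergeable_congr hm x).mpr ((mem_mergedOf hB x).mp hmx))
    · rw [if_neg (by
        intro hc
        exact hM (a3.mp hc))]
      rw [if_pos (by
        rw [List.isEmpty_iff]
        by_contra hc
        obtain ⟨p, hp⟩ := List.exists_mem_of_ne_nil _ hc
        exact hM ⟨p, (mergeable_congr hm p).mpr ((mem_mergedOf hB p).mp hp)⟩)]
      apply PySem.List.sorted_eq_sorted_of_perm _ _ _ (fun a b h => h)
      apply (List.perm_ext_iff_of_nodup
        (PySem.Set.nodup_union _ _ (PySem.Set.nodup_diff _ _ hA)) hB).mpr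
      intro x
      rw [hsA' x]
      constructor
      · rintro (⟨hx, _⟩ | hMx)
        · exact (hm x).mp hx
        · exact absurd ⟨x, hMx⟩ hM
      · intro hx
        exact Or.inl ⟨(hm x).mpr hx, fun ⟨p, hp, _⟩ => hM ⟨p, hp⟩⟩

-- ===== VERDICT (by name: the statement is the Claim_ definition above) =====
theorem compact_geohashes_spec : Claim_equal_compact_geohashes := by
  intro hashes min_len _
  unfold Spec_compact_geohashes compact_geohashes compact_geohashes_alt
  exact master min_len _ _ _ (PySem.Set.nodup_ofList hashes) (PySem.Set.nodup_ofList hashes)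
    (fun _ => Iff.rfl)
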